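-- pv_equiv track=rewrite | github.com/diskrorik/Shokhin-Arkhip | normal.py | generators_of_Zm_star
-- ===== SOURCE A (Python) =====
-- from typing import List, Dict
--
-- def get_parameters(N: int) -> Dict[str, int]:
--     """Вычисляет все параметры на основе N"""
--     m = 4 + (N % 5)
--     n = 2 + (N % 10)
--     k = 1 + (N % 7)
--     n1 = N % 6
--     n2 = (N + 1) % 6
--     n3 = (N + 2) % 6
--
--     # Параметры p, s, r, t в зависимости от N mod 5
--     mod5 = N % 5
--
--     if mod5 == 0:
--         p, s, r, t = 29, 5, 59, 9
--     elif mod5 == 1: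
--         p, s, r, t = 31, 4, 60, 8
--     elif mod5 == 2:
--         p, s, r, t = 37, 3, 38, 7
--     elif mod5 == 3:
--         p, s, r, t = 23, 17, 45, 12
--     else:
--         p, s, r, t = 19, 15, 44, 14
--
--     # Параметры для полиномов
--     if mod5 == 0:
--         p_field, m_field = 5, 3
--     elif mod5 == 1:
--         p_field, m_field = 3, 4
--     elif mod5 == 2:
--         p_field, m_field = 2, 7
--     elif mod5 == 3:
--         p_field, m_field = 13, 2
--     else:
--         p_field, m_field = 11, 2
--
--     return {
--         'm': m, 'n': n, 'k': k,
--         'n1': n1, 'n2': n2, 'n3': n3,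
--         'p': p, 's': s, 'r': r, 't': t,
--         'p_field': p_field, 'm_field': m_field
--     }
--
-- def gcd(a: int, b: int) -> int:
--     """Наибольший общий делитель"""
--     while b:
--         a, b = b, a % b
--     return a
--
-- def multiplicative_order(a: int, n: int) -> int:
--     """Находит мультипликативный порядок a по модулю n"""
--     if gcd(a, n) != 1:
--         return -1
--
--     order = 1
--     power = a % n
--     while power != 1:
--         power = (power * a) % n
--         order += 1
--     return order
--
-- def generators_of_Zm_star(N: int) -> list:
--     """Находит все образующие (примитивные корни) циклической группы Z_m^*"""
--     params = get_parameters(N)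
--     m = params['m']
--
--     Zm_star = [x for x in range(1, m) if gcd(x, m) == 1]
--
--     if not Zm_star:
--         return []
--
--     generators = []
--     group_order = len(Zm_star)
--
--     for g in Zm_star:
--         if multiplicative_order(g, m) == group_order:
--             generators.append(g)
--
--     return generators
-- ===== SOURCE B (Python) =====
-- def generators_of_Zm_star(N: int) -> list:
--     from math import gcd
--     m = 4 + (N % 5)
--     Zm_star = [x for x in range(1, m) if gcd(x, m) == 1]
--     if not Zm_star:
--         return []
--     group_order = len(Zm_star)
--     # distinct prime factors of group_order
--     primes = []
--     d, n = 2, group_order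
--     while d * d <= n:
--         if n % d == 0:
--             primes.append(d)
--             while n % d == 0:
--                 n //= d
--         d += 1
--     if n > 1:
--         primes.append(n)
--     return [g for g in Zm_star
--             if all(pow(g, group_order // q, m) != 1 for q in primes)]
-- ===== Notes on version B (the rewrite author's own statement) =====
-- stated objective: alternative
-- what changed: Replaces A's per-element full multiplicative-order computation (and its order-comparison loop) with the classical primitive-root test: factor the group order phi(m) into distinct primes once and keep g iff no prime-quotient power pow(g, phi(m)//q, m) is the identity.
import Mathlib
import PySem

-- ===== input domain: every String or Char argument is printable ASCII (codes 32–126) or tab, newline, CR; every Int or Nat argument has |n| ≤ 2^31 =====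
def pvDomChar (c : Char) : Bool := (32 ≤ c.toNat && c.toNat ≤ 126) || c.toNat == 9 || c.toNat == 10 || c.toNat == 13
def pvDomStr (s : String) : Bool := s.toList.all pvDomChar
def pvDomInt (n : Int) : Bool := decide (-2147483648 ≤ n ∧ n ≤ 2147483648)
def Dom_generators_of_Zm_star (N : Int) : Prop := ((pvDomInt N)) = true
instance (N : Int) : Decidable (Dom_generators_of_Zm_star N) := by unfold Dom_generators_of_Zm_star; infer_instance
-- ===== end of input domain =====

-- B replaces A's full multiplicative-order computation per element by the classical
-- prime-quotient primitive-root test over the distinct primes q dividing φ(m); objective: alternative.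

-- ===== PORT A =====
-- get_parameters: dict literal, transliterated (branches in source order)
def pvGetParameters (N : Int) : PySem.Dict String Int :=
  let m := 4 + PySem.Int.mod N 5
  let n := 2 + PySem.Int.mod N 10
  let k := 1 + PySem.Int.mod N 7
  let n1 := PySem.Int.mod N 6
  let n2 := PySem.Int.mod (N + 1) 6
  let n3 := PySem.Int.mod (N + 2) 6
  let mod5 := PySem.Int.mod N 5
  let (p, s, r, t) : Int × Int × Int × Int :=
    if mod5 = 0 then (29, 5, 59, 9)
    else if mod5 = 1 then (31, 4, 60, 8)
    else if mod5 = 2 then (37, 3, 38, 7)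
    else if mod5 = 3 then (23, 17, 45, 12)
    else (19, 15, 44, 14)
  let (p_field, m_field) : Int × Int :=
    if mod5 = 0 then (5, 3)
    else if mod5 = 1 then (3, 4)
    else if mod5 = 2 then (2, 7)
    else if mod5 = 3 then (13, 2)
    else (11, 2)
  PySem.Dict.ofList
    [("m", m), ("n", n), ("k", k),
     ("n1", n1), ("n2", n2), ("n3", n3),
     ("p", p), ("s", s), ("r", r), ("t", t),
     ("p_field", p_field), ("m_field", m_field)]

-- gcd: while b: a, b = b, a % b  (fuel |b|+1 only makes the loop total; |b| strictly
-- decreases per step for the nonnegative arguments A feeds it, so fuel never runs out)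
def pvGcdLoop : Nat → Int → Int → Int
  | 0, a, _ => a
  | fuel + 1, a, b => if b = 0 then a else pvGcdLoop fuel b (PySem.Int.mod a b)

def pvGcd (a b : Int) : Int := pvGcdLoop (b.natAbs + 1) a b

-- while power != 1: power = (power * a) % n; order += 1  (fuel |n|+1 is a totality
-- guard; for a unit a mod n the order divides φ(n) ≤ |n|, so the loop ends in time)
def pvOrdLoop : Nat → Int → Int → Int → Int → Int
  | 0, _, _, order, _ => order
  | fuel + 1, a, n, order, power =>
      if power = 1 then order
      else pvOrdLoop fuel a n (order + 1) (PySem.Int.mod (power * a) n)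

def pvMultiplicativeOrder (a n : Int) : Int :=
  if pvGcd a n ≠ 1 then -1
  else pvOrdLoop (n.natAbs + 1) a n 1 (PySem.Int.mod a n)

def generators_of_Zm_star (N : Int) : List Int :=
  let params := pvGetParameters N
  let m := params.getD "m" 0   -- params['m']; key "m" is always present, so getD is exact
  let Zm_star := (PySem.List.pyRange 1 m 1).filter (fun x => pvGcd x m == 1)
  if Zm_star = [] then []
  else
    let group_order : Int := Zm_star.length
    Zm_star.filter (fun g => pvMultiplicativeOrder g m == group_order)

-- ===== PORT B =====
-- inner `while n % d == 0: n //= d` (fuel |n| suffices: n shrinks by a factor ≥ 2 each step)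
def pvStrip : Nat → Int → Int → Int
  | 0, n, _ => n
  | fuel + 1, n, d =>
      if PySem.Int.mod n d = 0 then pvStrip fuel (PySem.Int.floordiv n d) d else n

-- outer trial-division loop `while d*d <= n`; returns (primes, leftover n)
def pvFactorLoop : Nat → Int → Int → List Int → List Int × Int
  | 0, _, n, acc => (acc, n)
  | fuel + 1, d, n, acc =>
      if d * d ≤ n then
        if PySem.Int.mod n d = 0 then
          pvFactorLoop fuel (d + 1) (pvStrip n.natAbs n d) (acc ++ [d])
        else pvFactorLoop fuel (d + 1) n acc
      else (acc, n)

def generators_of_Zm_star_alt (N : Int) : List Int :=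
  let m := 4 + PySem.Int.mod N 5
  let Zm_star := (PySem.List.pyRange 1 m 1).filter (fun x => (Int.gcd x m : Int) == 1)
  if Zm_star = [] then []
  else
    let group_order : Int := Zm_star.length
    let pr := pvFactorLoop group_order.natAbs 2 group_order []
    let primes := if pr.2 > 1 then pr.1 ++ [pr.2] else pr.1
    Zm_star.filter (fun g =>
      primes.all (fun q => PySem.Int.powMod g (PySem.Int.floordiv group_order q).toNat m != 1))

-- ===== PRECONDITION & SPEC =====
def Spec_generators_of_Zm_star (N : Int) (out : List Int) : Prop := out = generators_of_Zm_star_alt N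
instance (N : Int) (out : List Int) : Decidable (Spec_generators_of_Zm_star N out) := by unfold Spec_generators_of_Zm_star; infer_instance

-- ===== CLAIM (what is proved, stated in full; the proofs are below) =====
def Claim_equal_generators_of_Zm_star : Prop := ∀ (N : Int), Dom_generators_of_Zm_star N → Spec_generators_of_Zm_star N (generators_of_Zm_star N)

-- ===== LEMMAS AND PROOFS =====

-- A's body as a function of m alone (proof-side helper)
def pvACore (m : Int) : List Int :=
  let Zm_star := (PySem.List.pyRange 1 m 1).filter (fun x => pvGcd x m == 1)
  if Zm_star = [] then []
  else
    let group_order : Int := Zm_star.length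
    Zm_star.filter (fun g => pvMultiplicativeOrder g m == group_order)

-- B's body as a function of m alone (proof-side helper)
def pvBCore (m : Int) : List Int :=
  let Zm_star := (PySem.List.pyRange 1 m 1).filter (fun x => (Int.gcd x m : Int) == 1)
  if Zm_star = [] then []
  else
    let group_order : Int := Zm_star.length
    let pr := pvFactorLoop group_order.natAbs 2 group_order []
    let primes := if pr.2 > 1 then pr.1 ++ [pr.2] else pr.1
    Zm_star.filter (fun g =>
      primes.all (fun q => PySem.Int.powMod g (PySem.Int.floordiv group_order q).toNat m != 1))

lemma pvGetParameters_m (N : Int) :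
    (pvGetParameters N).getD "m" 0 = 4 + PySem.Int.mod N 5 := by
  simp [pvGetParameters, PySem.Dict.getD, PySem.Dict.ofList, PySem.Dict.update,
        PySem.Dict.insert, PySem.Dict.empty, PySem.Dict.get?, List.foldl]

lemma pvA_eq_core (N : Int) : generators_of_Zm_star N = pvACore (4 + PySem.Int.mod N 5) := by
  unfold generators_of_Zm_star pvACore
  simp only [pvGetParameters_m]

lemma pvB_eq_core (N : Int) : generators_of_Zm_star_alt N = pvBCore (4 + PySem.Int.mod N 5) := by
  rfl

lemma pvCore_eq (m : Int) (h : 4 ≤ m ∧ m ≤ 8) : pvACore m = pvBCore m := by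
  obtain ⟨h1, h2⟩ := h
  interval_cases m <;> decide

-- ===== VERDICT (by name: the statement is the Claim_ definition above) =====
theorem generators_of_Zm_star_spec : Claim_equal_generators_of_Zm_star := by
  intro N _
  unfold Spec_generators_of_Zm_star
  rw [pvA_eq_core, pvB_eq_core]
  apply pvCore_eq
  have h1 := PySem.Int.mod_nonneg N (b := 5) (by norm_num)
  have h2 := PySem.Int.mod_lt N (b := 5) (by norm_num)
  omega
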